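-- pv_equiv track=rewrite | github.com/AkshuDev/PHardwareITK | phardwareitk/System/CSpectre.py | _join_function_lines
-- ===== SOURCE A (Python) =====
-- def _join_function_lines(text:str):
--     buf, out = [], []
--     for line in text.splitlines():
--         buf.append(line.strip())
--         if ";" in line:         # function decl ends
--             out.append(" ".join(buf))
--             buf = []
--     return out
-- ===== SOURCE B (Python) =====
-- def _groups(lines):
--     # split off the leading span of semicolon-free lines, then the boundary line
--     pre, rest = [], list(lines)
--     while rest and ";" not in rest[0]:
--         pre.append(rest.pop(0))
--     if not rest:
--         return []  # trailing lines with no semicolon are discarded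
--     head = " ".join(l.strip() for l in pre + [rest[0]])
--     return [head] + _groups(rest[1:])
--
-- def _join_function_lines(text: str):
--     return _groups(text.splitlines())
-- ===== Notes on version B (the rewrite author's own statement) =====
-- stated objective: alternative
-- what changed: Replaced A's single accumulating pass with mutable buffer/output lists by a recursive span decomposition: repeatedly split the line list at the first line containing a semicolon, join that group, and recurse on the remainder (trailing semicolon-free lines fall out naturally).
import Mathlib
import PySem

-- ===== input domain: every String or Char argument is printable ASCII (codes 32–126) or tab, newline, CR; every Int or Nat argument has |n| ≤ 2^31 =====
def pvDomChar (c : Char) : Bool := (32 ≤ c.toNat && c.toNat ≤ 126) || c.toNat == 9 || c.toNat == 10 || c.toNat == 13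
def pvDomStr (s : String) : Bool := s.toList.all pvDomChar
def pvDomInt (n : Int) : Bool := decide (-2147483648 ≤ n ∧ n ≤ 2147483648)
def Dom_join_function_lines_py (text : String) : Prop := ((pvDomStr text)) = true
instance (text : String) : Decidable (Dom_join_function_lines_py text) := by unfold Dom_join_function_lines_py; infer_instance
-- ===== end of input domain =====

-- B restructures A's single accumulating pass as a span-then-recurse grouping; return values proved equal.

-- ===== PORT A =====
-- literal transliteration of A's loop: state (buf, out), one pass over splitlines
-- the loop body of A, as a named helper
def pvStepA (st : List String × List String) (line : String) : List String × List String :=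
  let buf := st.1 ++ [PySem.Str.strip line]
  if PySem.Str.isIn ";" line then (([] : List String), st.2 ++ [PySem.Str.join " " buf])
  else (buf, st.2)

def join_function_lines_py (text : String) : List String :=
  let r := (PySem.Str.splitlines text).foldl pvStepA (([] : List String), ([] : List String))
  r.2

-- ===== PORT B =====
-- Source B's _groups: split off the span of lines without ';' plus the boundary line, recurse on the rest
def pvGroups (lines : List String) : List String :=
  match h : lines.dropWhile (fun l => !PySem.Str.isIn ";" l) with
  | [] => []
  | b :: rs =>
    PySem.Str.join " " (((lines.takeWhile (fun l => !PySem.Str.isIn ";" l)) ++ [b]).map PySem.Str.strip)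
      :: pvGroups rs
termination_by lines.length
decreasing_by
  have := List.length_dropWhile_le (fun l => !PySem.Str.isIn ";" l) lines
  rw [h] at this; simp at this; omega

def join_function_lines_py_alt (text : String) : List String :=
  pvGroups (PySem.Str.splitlines text)

-- ===== PRECONDITION & SPEC =====
def Spec_join_function_lines_py (text : String) (out : List String) : Prop := out = join_function_lines_py_alt text
instance (text : String) (out : List String) : Decidable (Spec_join_function_lines_py text out) := by unfold Spec_join_function_lines_py; infer_instance

-- ===== CLAIM (what is proved, stated in full; the proofs are below) =====
def Claim_equal_join_function_lines_py : Prop := ∀ (text : String), Dom_join_function_lines_py text → Spec_join_function_lines_py text (join_function_lines_py text)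

-- ===== LEMMAS AND PROOFS =====

-- recursive restatement of A's loop, used only in the proofs
def pvAGo (buf : List String) : List String → List String
  | [] => []
  | l :: ls =>
    if PySem.Str.isIn ";" l then
      PySem.Str.join " " (buf ++ [PySem.Str.strip l]) :: pvAGo [] ls
    else pvAGo (buf ++ [PySem.Str.strip l]) ls

lemma pvFold_eq (ls : List String) : ∀ (buf out : List String),
    (ls.foldl pvStepA (buf, out)).2 = out ++ pvAGo buf ls := by
  induction ls with
  | nil => intro buf out; simp [pvAGo]
  | cons l ls ih =>
    intro buf out
    simp only [List.foldl_cons]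
    by_cases h : PySem.Str.isIn ";" l
    · have hC : PySem.Chars.isIn [';'] l.toList = true := by simpa using h
      have hstep : pvStepA (buf, out) l
          = (([] : List String), out ++ [PySem.Str.join " " (buf ++ [PySem.Str.strip l])]) := by
        simp [pvStepA, hC]
      rw [hstep, ih]
      simp [pvAGo, hC]
    · have hC : PySem.Chars.isIn [';'] l.toList = false := by simpa using h
      have hstep : pvStepA (buf, out) l = (buf ++ [PySem.Str.strip l], out) := by
        simp [pvStepA, hC]
      rw [hstep, ih]
      simp [pvAGo, hC]

lemma pvAGo_nil_of_noSemi (ls : List String) (h : ∀ l ∈ ls, PySem.Str.isIn ";" l = false) :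
    ∀ buf, pvAGo buf ls = [] := by
  induction ls with
  | nil => intro _; rfl
  | cons l ls ih =>
    intro buf
    have hC : PySem.Chars.isIn [';'] l.toList = false := by simpa using h l (by simp)
    simp only [pvAGo]
    rw [if_neg (by simp [hC])]
    exact ih (fun x hx => h x (by simp [hx])) _

lemma pvAGo_span (pre : List String) : ∀ (buf : List String),
    (∀ l ∈ pre, PySem.Str.isIn ";" l = false) →
    ∀ (b : String) (rs : List String), PySem.Str.isIn ";" b = true →
    pvAGo buf (pre ++ b :: rs)
      = PySem.Str.join " " (buf ++ (pre ++ [b]).map PySem.Str.strip) :: pvAGo [] rs := by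
  induction pre with
  | nil =>
    intro buf _ b rs hb
    have hbC : PySem.Chars.isIn [';'] b.toList = true := by simpa using hb
    simp [pvAGo, hbC]
  | cons p pre ih =>
    intro buf hpre b rs hb
    have hpC : PySem.Chars.isIn [';'] p.toList = false := by simpa using hpre p (by simp)
    simp only [List.cons_append, pvAGo]
    rw [if_neg (by simp [hpC])]
    rw [ih _ (fun x hx => hpre x (by simp [hx])) b rs hb]
    simp

lemma pvGroups_eq_aGo (lines : List String) : pvGroups lines = pvAGo [] lines := by
  fun_induction pvGroups lines with
  | case1 lines h =>
    have hall : ∀ l ∈ lines, PySem.Str.isIn ";" l = false := by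
      have := List.dropWhile_eq_nil_iff.mp h
      intro l hl; simpa using this l hl
    exact (pvAGo_nil_of_noSemi lines hall []).symm
  | case2 lines b rs h ih =>
    have hsplit : lines = lines.takeWhile (fun l => !PySem.Str.isIn ";" l) ++ b :: rs := by
      conv_lhs => rw [← List.takeWhile_append_dropWhile (p := fun l => !PySem.Str.isIn ";" l) (l := lines)]
      rw [h]
    have hpre : ∀ l ∈ lines.takeWhile (fun l => !PySem.Str.isIn ";" l),
        PySem.Str.isIn ";" l = false := by
      intro l hl
      have := List.mem_takeWhile_imp hl
      simpa using this
    have hb : PySem.Str.isIn ";" b = true := by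
      have := List.head?_dropWhile_not (fun l => !PySem.Str.isIn ";" l) lines
      rw [h] at this; simpa using this
    conv_rhs => rw [hsplit]
    rw [pvAGo_span _ [] hpre b rs hb, ih]
    simp

-- ===== VERDICT (by name: the statement is the Claim_ definition above) =====
theorem join_function_lines_py_spec : Claim_equal_join_function_lines_py := by
  intro text _
  unfold Spec_join_function_lines_py join_function_lines_py join_function_lines_py_alt
  rw [pvGroups_eq_aGo]
  simpa using pvFold_eq (PySem.Str.splitlines text) [] []
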